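-- pv_equiv track=rewrite | github.com/gtmacari/Algorithm-Design | ShipmentSchedule.py | ALG
-- ===== SOURCE A (Python) =====
-- def ALG(supply, a_rate, b_cost):
--
-- 	#Create variables to keep track of...
--     #   -The minimum shipment cost at the current point
-- 	#	-The minimum shipment cost for shipments ending at the given index
-- 	#	-The shipping company schedule for shipments ending at the given index
--     current_min = 0
--     min_position = []
--     company_schedules = []
--
-- 	#For every value in the list of weekly supply shipments...
--     for i in range(len(supply)):
--
--         #If the current index is the first in the list, there is no option. You
-- 		#must pick company A.
-- 		#
-- 		#This is its own case because the company schedules array of arrays has to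
-- 		#be created. For future case, the company schedule of prior indexes is used
-- 		#but that can not be the case for the first index.
--         if i == 0:
--             current_min += a_rate*supply[i]
--             min_position.append(current_min)
--             company_schedules.append(['A'])
--
-- 		#If the current index is less than 4, there is no option. You must pick
-- 		#company A.
--         elif i < 4:
--             current_min += a_rate*supply[i]
--             min_position.append(current_min)
--             current_schedule = company_schedules[i-1].copy()
--             current_schedule.append('A')
--             company_schedules.append(current_schedule)
--
-- 		#If the current index is greater than or equal to 4, you much check if
-- 		#Company A or Company B is optimal.
-- 		#
-- 		#Company A is optimal to choose if the previous index's optimal shipping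
-- 		#cost plus the rate to ship the current index with Company A is less than
-- 		#the cost of shipping the four most recent indexes with Company B.
-- 		#Company B is optimal to choose if the cost of shipping the four most recent
-- 		#indexes with Company B is less than the previous index's optimal shipping
-- 		#cost plus the rate to ship the current index with Company A.
-- 		#
-- 		#If Company B is the optimal choice, then the four most recent shipments will
-- 		#use Company B, and all entries prior to the most recent 4 will revert back
-- 		#to the company schedule from when the (i-4)th was the last entry.
--         else:
--             a_price = min_position[i-1]+(a_rate*supply[i])
--             b_price = min_position[i-4]+(b_cost*4)
--             if a_price <= b_price:
--                 current_min += a_rate*supply[i]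
--                 min_position.append(current_min)
--                 current_schedule = company_schedules[i-1].copy()
--                 current_schedule.append('A')
--                 company_schedules.append(current_schedule)
--             else:
--                 current_min = min_position[i-4]+(b_cost*4)
--                 min_position.append(current_min)
--                 current_schedule = company_schedules[i-4].copy()
--                 current_schedule.append('B')
--                 current_schedule.append('B')
--                 current_schedule.append('B')
--                 current_schedule.append('B')
--                 company_schedules.append(current_schedule)
--
--     return company_schedules[len(company_schedules)-1]
-- ===== SOURCE B (Python) =====
-- def ALG(supply, a_rate, b_cost):
--     # O(n) DP: keep only costs and a per-week backpointer choice, reconstruct once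
--     n = len(supply)
--     cost = []
--     choice = []
--     cur = 0
--     for i in range(n):
--         a_price = cur + a_rate * supply[i]
--         if i < 4:
--             cur = a_price
--             choice.append('A')
--         else:
--             b_price = cost[i - 4] + b_cost * 4
--             if a_price <= b_price:
--                 cur = a_price
--                 choice.append('A')
--             else:
--                 cur = b_price
--                 choice.append('B')
--         cost.append(cur)
--     out = []
--     i = n - 1
--     while i >= 0:
--         if choice[i] == 'A':
--             out.append('A')
--             i -= 1
--         else:
--             out += ['B', 'B', 'B', 'B']
--             i -= 4
--     out.reverse()
--     return out
-- ===== Notes on version B (the rewrite author's own statement) =====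
-- stated objective: faster
-- what changed: Replaced the per-week copying of whole company schedules (quadratic) by a linear DP that stores only costs and a one-letter backpointer per week, reconstructing the schedule once at the end by walking the backpointers
import Mathlib
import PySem

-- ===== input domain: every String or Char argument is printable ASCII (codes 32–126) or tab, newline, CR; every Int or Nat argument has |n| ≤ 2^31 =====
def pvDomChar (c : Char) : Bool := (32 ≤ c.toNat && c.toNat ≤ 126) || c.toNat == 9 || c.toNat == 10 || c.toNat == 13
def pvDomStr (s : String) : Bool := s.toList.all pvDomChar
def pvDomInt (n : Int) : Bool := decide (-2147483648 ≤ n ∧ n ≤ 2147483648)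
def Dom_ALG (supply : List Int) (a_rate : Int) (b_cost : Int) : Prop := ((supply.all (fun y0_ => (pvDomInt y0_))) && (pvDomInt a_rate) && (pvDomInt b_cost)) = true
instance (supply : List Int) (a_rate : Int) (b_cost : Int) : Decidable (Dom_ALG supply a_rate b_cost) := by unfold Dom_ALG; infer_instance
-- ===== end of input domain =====

-- B replaces A's quadratic per-week schedule copying by a linear cost/backpointer DP with
-- a single reconstruction pass at the end (objective: faster, asymptotic).

-- ===== PORT A =====
-- One iteration of A's for-loop; state = (current_min, min_position, company_schedules).
-- All Python list indexings inside A's loop are in range for i ∈ range(len(supply)), so getD is exact there.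
def ALGstep (supply : List Int) (a_rate : Int) (b_cost : Int)
    (st : Int × List Int × List (List String)) (i : Nat) :
    Int × List Int × List (List String) :=
  let cm := st.1
  let mp := st.2.1
  let cs := st.2.2
  if i = 0 then
    let cm' := cm + a_rate * supply.getD i 0
    (cm', mp ++ [cm'], cs ++ [["A"]])
  else if i < 4 then
    let cm' := cm + a_rate * supply.getD i 0
    (cm', mp ++ [cm'], cs ++ [cs.getD (i-1) [] ++ ["A"]])
  else
    let a_price := mp.getD (i-1) 0 + a_rate * supply.getD i 0
    let b_price := mp.getD (i-4) 0 + b_cost * 4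
    if a_price ≤ b_price then
      let cm' := cm + a_rate * supply.getD i 0
      (cm', mp ++ [cm'], cs ++ [cs.getD (i-1) [] ++ ["A"]])
    else
      (b_price, mp ++ [b_price], cs ++ [cs.getD (i-4) [] ++ ["B","B","B","B"]])

def ALG (supply : List Int) (a_rate : Int) (b_cost : Int) : List String :=
  let st := (List.range supply.length).foldl (ALGstep supply a_rate b_cost) (0, [], [])
  let cs := st.2.2
  cs.getD (cs.length - 1) []   -- Python cs[len(cs)-1]; raises IndexError on empty supply, excluded by Pre_ALG

-- ===== PORT B =====
-- One iteration of B's for-loop; state = (cur, cost, choice).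
def ALGstepB (supply : List Int) (a_rate : Int) (b_cost : Int)
    (st : Int × List Int × List String) (i : Nat) :
    Int × List Int × List String :=
  let cur := st.1
  let cost := st.2.1
  let choice := st.2.2
  let a_price := cur + a_rate * supply.getD i 0
  if i < 4 then
    (a_price, cost ++ [a_price], choice ++ ["A"])
  else
    let b_price := cost.getD (i-4) 0 + b_cost * 4
    if a_price ≤ b_price then
      (a_price, cost ++ [a_price], choice ++ ["A"])
    else
      (b_price, cost ++ [b_price], choice ++ ["B"])

-- B's reconstruction while-loop (walks backpointers from index i down); `fuel` only makes
-- the recursion structural — with fuel = len(supply) it never runs out before i < 0.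
def backLoop (choice : List String) : Nat → Int → List String → List String
  | 0, _, out => out
  | (f+1), i, out =>
    if 0 ≤ i then
      if choice.getD i.toNat "A" == "A" then backLoop choice f (i - 1) (out ++ ["A"])
      else backLoop choice f (i - 4) (out ++ ["B","B","B","B"])
    else out

def ALG_alt (supply : List Int) (a_rate : Int) (b_cost : Int) : List String :=
  let st := (List.range supply.length).foldl (ALGstepB supply a_rate b_cost) (0, [], [])
  (backLoop st.2.2 supply.length ((supply.length : Int) - 1) []).reverse

-- ===== PRECONDITION & SPEC =====
-- Pre_ excludes only the empty supply list, on which A raises IndexError.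
def Pre_ALG (supply : List Int) (a_rate : Int) (b_cost : Int) : Prop := supply ≠ []
instance (supply : List Int) (a_rate : Int) (b_cost : Int) : Decidable (Pre_ALG supply a_rate b_cost) := by unfold Pre_ALG; infer_instance
def pvWitness_ALG : List Int × Int × Int := ([3, 1, 4, 1, 5, 9], 2, 3)

def Spec_ALG (supply : List Int) (a_rate : Int) (b_cost : Int) (out : List String) : Prop := out = ALG_alt supply a_rate b_cost
instance (supply : List Int) (a_rate : Int) (b_cost : Int) (out : List String) : Decidable (Spec_ALG supply a_rate b_cost out) := by unfold Spec_ALG; infer_instance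

-- ===== CLAIM (what is proved, stated in full; the proofs are below) =====
def Claim_equal_ALG : Prop := ∀ (supply : List Int) (a_rate : Int) (b_cost : Int), Dom_ALG supply a_rate b_cost → Pre_ALG supply a_rate b_cost → Spec_ALG supply a_rate b_cost (ALG supply a_rate b_cost)

-- ===== LEMMAS AND PROOFS =====

theorem pv_getD_append_lt {α : Type} (xs ys : List α) (j : Nat) (d : α) (h : j < xs.length) :
    (xs ++ ys).getD j d = xs.getD j d := by
  simp [List.getD, List.getElem?_append_left h]

theorem pv_getD_append_self {α : Type} (xs : List α) (v d : α) :
    (xs ++ [v]).getD xs.length d = v := by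
  simp [List.getD]

theorem pv_getD_ge {α : Type} (xs : List α) (j : Nat) (d : α) (h : xs.length ≤ j) :
    xs.getD j d = d := by
  simp [List.getD, List.getElem?_eq_none h]

-- Pure characterisation of the schedule ending at index i determined by the backpointers.
def sched (ch : List String) : Nat → List String
  | 0 => ["A"]
  | (i+1) => if ch.getD (i+1) "A" == "A" then sched ch i ++ ["A"]
             else sched ch (i+1-4) ++ ["B","B","B","B"]

theorem sched_congr (ch1 ch2 : List String) (i : Nat)
    (h : ∀ t, t ≤ i → ch1.getD t "A" = ch2.getD t "A") : sched ch1 i = sched ch2 i := by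
  induction i using Nat.strong_induction_on with
  | _ i ih =>
    match i with
    | 0 => simp [sched]
    | (j+1) =>
      rw [sched, sched, h (j+1) (le_refl _)]
      split
      · rw [ih j (by omega) (fun t ht => h t (by omega))]
      · rw [ih (j+1-4) (by omega) (fun t ht => h t (by omega))]

theorem backLoop_neg (ch : List String) (f : Nat) (i : Int) (out : List String) (h : i < 0) :
    backLoop ch f i out = out := by
  cases f with
  | zero => rfl
  | succ f => rw [backLoop]; rw [if_neg (by omega)]

theorem backLoop_eq (ch : List String) (f i : Nat) (out : List String)
    (hf : i < f) (h4 : ∀ j, j < 4 → ch.getD j "A" = "A") :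
    backLoop ch f (i : Int) out = out ++ (sched ch i).reverse := by
  induction f generalizing i out with
  | zero => omega
  | succ f ih =>
    rw [backLoop, if_pos (by positivity)]
    have hto : (i : Int).toNat = i := Int.toNat_natCast i
    rw [hto]
    by_cases hA : ch.getD i "A" == "A"
    · rw [if_pos hA]
      match i with
      | 0 =>
        rw [backLoop_neg ch f _ _ (by omega)]
        simp [sched]
      | (j+1) =>
        have : ((j+1 : Nat) : Int) - 1 = ((j : Nat) : Int) := by push_cast; ring
        rw [this, ih j _ (by omega)]
        rw [sched, if_pos hA]
        simp
    · rw [if_neg hA]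
      have hi4 : 4 ≤ i := by
        by_contra hlt
        exact hA (by rw [h4 i (by omega)]; rfl)
      match i, hi4 with
      | (j+1), _ =>
        have : ((j+1 : Nat) : Int) - 4 = ((j+1-4 : Nat) : Int) := by omega
        rw [this, ih (j+1-4) _ (by omega)]
        rw [sched, if_neg hA]
        simp
-- A-loop state after k iterations
def stA (supply : List Int) (a_rate : Int) (b_cost : Int) (k : Nat) :
    Int × List Int × List (List String) :=
  (List.range k).foldl (ALGstep supply a_rate b_cost) (0, [], [])

-- B-loop state after k iterations
def stB (supply : List Int) (a_rate : Int) (b_cost : Int) (k : Nat) :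
    Int × List Int × List String :=
  (List.range k).foldl (ALGstepB supply a_rate b_cost) (0, [], [])

theorem stA_succ (supply : List Int) (a_rate : Int) (b_cost : Int) (k : Nat) :
    stA supply a_rate b_cost (k+1) = ALGstep supply a_rate b_cost (stA supply a_rate b_cost k) k := by
  simp [stA, List.range_succ]

theorem stB_succ (supply : List Int) (a_rate : Int) (b_cost : Int) (k : Nat) :
    stB supply a_rate b_cost (k+1) = ALGstepB supply a_rate b_cost (stB supply a_rate b_cost k) k := by
  simp [stB, List.range_succ]

-- The joint loop invariant.
def pvInv (supply : List Int) (a_rate : Int) (b_cost : Int) (k : Nat) : Prop :=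
  (stA supply a_rate b_cost k).1 = (stB supply a_rate b_cost k).1 ∧
  (stA supply a_rate b_cost k).2.1 = (stB supply a_rate b_cost k).2.1 ∧
  (stA supply a_rate b_cost k).2.1.length = k ∧
  (stA supply a_rate b_cost k).2.2.length = k ∧
  (stB supply a_rate b_cost k).2.2.length = k ∧
  (∀ j, j + 1 = k → (stA supply a_rate b_cost k).2.1.getD j 0 = (stA supply a_rate b_cost k).1) ∧
  (∀ j, j < 4 → j < k → (stB supply a_rate b_cost k).2.2.getD j "A" = "A") ∧
  (∀ j, j < k → (stA supply a_rate b_cost k).2.2.getD j [] = sched (stB supply a_rate b_cost k).2.2 j)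

theorem pvInv_step (supply : List Int) (a_rate : Int) (b_cost : Int) (k : Nat)
    (ih : pvInv supply a_rate b_cost k)
    (v : Int) (E : List String) (c : String)
    (hA : stA supply a_rate b_cost (k+1) =
          (v, (stA supply a_rate b_cost k).2.1 ++ [v], (stA supply a_rate b_cost k).2.2 ++ [E]))
    (hB : stB supply a_rate b_cost (k+1) =
          (v, (stB supply a_rate b_cost k).2.1 ++ [v], (stB supply a_rate b_cost k).2.2 ++ [c]))
    (hc : k < 4 → c = "A")
    (hE : E = sched ((stB supply a_rate b_cost k).2.2 ++ [c]) k) :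
    pvInv supply a_rate b_cost (k+1) := by
  obtain ⟨e1, e2, l1, l2, l3, hlast, hA4, hsch⟩ := ih
  refine ⟨?_, ?_, ?_, ?_, ?_, ?_, ?_, ?_⟩
  · rw [hA, hB]
  · rw [hA, hB]; simp [e2]
  · rw [hA]; simp [l1]
  · rw [hA]; simp [l2]
  · rw [hB]; simp [l3]
  · intro j hj
    have hjk : j = k := by omega
    subst hjk
    have h := pv_getD_append_self (stA supply a_rate b_cost j).2.1 v 0
    rw [l1] at h
    rw [hA]
    exact h
  · intro j hj hjk
    rcases Nat.lt_or_ge j k with hlt | hge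
    · have h := pv_getD_append_lt (stB supply a_rate b_cost k).2.2 [c] j "A" (by omega)
      rw [hB]
      exact h.trans (hA4 j hj hlt)
    · have hj' : j = k := by omega
      subst hj'
      have h := pv_getD_append_self (stB supply a_rate b_cost j).2.2 c "A"
      rw [l3] at h
      rw [hB]
      exact h.trans (hc hj)
  · intro j hj
    rcases Nat.lt_or_ge j k with hlt | hge
    · have h := pv_getD_append_lt (stA supply a_rate b_cost k).2.2 [E] j [] (by omega)
      rw [hA, hB]
      exact h.trans ((hsch j hlt).trans (sched_congr _ _ j (fun t ht =>
        (pv_getD_append_lt _ [c] t "A" (by omega)).symm)))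
    · have hj' : j = k := by omega
      subst hj'
      have h := pv_getD_append_self (stA supply a_rate b_cost j).2.2 E []
      rw [l2] at h
      rw [hA, hB]
      exact h.trans hE

theorem sched_A_step (ch : List String) (k : Nat) (hk0 : k ≠ 0)
    (hc : ch.getD k "A" = "A") : sched ch k = sched ch (k-1) ++ ["A"] := by
  cases k with
  | zero => omega
  | succ j =>
    rw [sched, if_pos (by rw [hc]; rfl)]
    rfl

theorem sched_B_step (ch : List String) (k : Nat) (hk0 : k ≠ 0)
    (hc : ch.getD k "A" = "B") : sched ch k = sched ch (k-4) ++ ["B","B","B","B"] := by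
  cases k with
  | zero => omega
  | succ j =>
    rw [sched, if_neg (by rw [hc]; decide)]

theorem pvInv_holds (supply : List Int) (a_rate : Int) (b_cost : Int) :
    ∀ k, pvInv supply a_rate b_cost k := by
  intro k
  induction k with
  | zero =>
    refine ⟨rfl, rfl, rfl, rfl, rfl, ?_, ?_, ?_⟩ <;> intro j hj <;> omega
  | succ k ih =>
    obtain ⟨e1, e2, l1, l2, l3, hlast, hA4, hsch⟩ := ih
    -- the new schedule entry of an "A"-step equals sched of the extended backpointers
    have hEA : k ≠ 0 →
        (stA supply a_rate b_cost k).2.2.getD (k-1) [] ++ ["A"] =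
        sched ((stB supply a_rate b_cost k).2.2 ++ ["A"]) k := by
      intro hk0
      have hself := pv_getD_append_self (stB supply a_rate b_cost k).2.2 "A" "A"
      rw [l3] at hself
      rw [sched_A_step _ k hk0 hself, hsch (k-1) (by omega),
        sched_congr (stB supply a_rate b_cost k).2.2 ((stB supply a_rate b_cost k).2.2 ++ ["A"])
          (k-1) (fun t ht => (pv_getD_append_lt _ ["A"] t "A" (by omega)).symm)]
    have hEB : 4 ≤ k →
        (stA supply a_rate b_cost k).2.2.getD (k-4) [] ++ ["B","B","B","B"] =
        sched ((stB supply a_rate b_cost k).2.2 ++ ["B"]) k := by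
      intro hk4'
      have hself := pv_getD_append_self (stB supply a_rate b_cost k).2.2 "B" "A"
      rw [l3] at hself
      rw [sched_B_step _ k (by omega) hself, hsch (k-4) (by omega),
        sched_congr (stB supply a_rate b_cost k).2.2 ((stB supply a_rate b_cost k).2.2 ++ ["B"])
          (k-4) (fun t ht => (pv_getD_append_lt _ ["B"] t "A" (by omega)).symm)]
    by_cases hk0 : k = 0
    · subst hk0
      refine pvInv_step supply a_rate b_cost 0 ⟨e1, e2, l1, l2, l3, hlast, hA4, hsch⟩
        ((stB supply a_rate b_cost 0).1 + a_rate * supply.getD 0 0) ["A"] "A" ?_ ?_ (fun _ => rfl) ?_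
      · rw [stA_succ]
        simp [ALGstep, e1]
      · rw [stB_succ]
        simp [ALGstepB]
      · simp [sched]
    · by_cases hk4 : k < 4
      · refine pvInv_step supply a_rate b_cost k ⟨e1, e2, l1, l2, l3, hlast, hA4, hsch⟩
          ((stB supply a_rate b_cost k).1 + a_rate * supply.getD k 0)
          ((stA supply a_rate b_cost k).2.2.getD (k-1) [] ++ ["A"]) "A" ?_ ?_ (fun _ => rfl)
          (hEA hk0)
        · rw [stA_succ]
          simp only [ALGstep]
          rw [if_neg hk0, if_pos hk4, e1]
        · rw [stB_succ]
          simp only [ALGstepB]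
          rw [if_pos hk4]
      · have hAeq : (stA supply a_rate b_cost k).2.1.getD (k-1) 0 = (stB supply a_rate b_cost k).1 := by
          rw [hlast (k-1) (by omega), e1]
        by_cases hP : (stB supply a_rate b_cost k).1 + a_rate * supply.getD k 0 ≤
            (stB supply a_rate b_cost k).2.1.getD (k-4) 0 + b_cost * 4
        · have hP' : (stA supply a_rate b_cost k).2.1.getD (k-1) 0 + a_rate * supply.getD k 0 ≤
              (stA supply a_rate b_cost k).2.1.getD (k-4) 0 + b_cost * 4 := by
            rw [hAeq, e2]; exact hP
          refine pvInv_step supply a_rate b_cost k ⟨e1, e2, l1, l2, l3, hlast, hA4, hsch⟩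
            ((stB supply a_rate b_cost k).1 + a_rate * supply.getD k 0)
            ((stA supply a_rate b_cost k).2.2.getD (k-1) [] ++ ["A"]) "A" ?_ ?_ (fun _ => rfl)
            (hEA hk0)
          · rw [stA_succ]
            simp only [ALGstep]
            rw [if_neg hk0, if_neg hk4, if_pos hP', e1]
          · rw [stB_succ]
            simp only [ALGstepB]
            rw [if_neg hk4, if_pos hP]
        · have hP' : ¬ ((stA supply a_rate b_cost k).2.1.getD (k-1) 0 + a_rate * supply.getD k 0 ≤
              (stA supply a_rate b_cost k).2.1.getD (k-4) 0 + b_cost * 4) := by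
            rw [hAeq, e2]; exact hP
          refine pvInv_step supply a_rate b_cost k ⟨e1, e2, l1, l2, l3, hlast, hA4, hsch⟩
            ((stB supply a_rate b_cost k).2.1.getD (k-4) 0 + b_cost * 4)
            ((stA supply a_rate b_cost k).2.2.getD (k-4) [] ++ ["B","B","B","B"]) "B"
            ?_ ?_ (fun h => absurd h hk4) (hEB (by omega))
          · rw [stA_succ]
            simp only [ALGstep]
            rw [if_neg hk0, if_neg hk4, if_neg hP', e2]
          · rw [stB_succ]
            simp only [ALGstepB]
            rw [if_neg hk4, if_neg hP]

theorem ALG_eq_stA (supply : List Int) (a_rate : Int) (b_cost : Int) :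
    ALG supply a_rate b_cost =
    (stA supply a_rate b_cost supply.length).2.2.getD
      ((stA supply a_rate b_cost supply.length).2.2.length - 1) [] := rfl

theorem ALG_alt_eq_stB (supply : List Int) (a_rate : Int) (b_cost : Int) :
    ALG_alt supply a_rate b_cost =
    (backLoop (stB supply a_rate b_cost supply.length).2.2 supply.length
      ((supply.length : Int) - 1) []).reverse := rfl

-- ===== VERDICT (by name: the statement is the Claim_ definition above) =====
theorem ALG_spec : Claim_equal_ALG := by
  intro supply a_rate b_cost _hdom hpre
  unfold Spec_ALG
  obtain ⟨e1, e2, l1, l2, l3, hlast, hA4, hsch⟩ := pvInv_holds supply a_rate b_cost supply.length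
  have hn : 1 ≤ supply.length := by
    cases supply with
    | nil => exact absurd rfl hpre
    | cons a l => simp
  have h4 : ∀ j, j < 4 → (stB supply a_rate b_cost supply.length).2.2.getD j "A" = "A" := by
    intro j hj
    by_cases hjn : j < supply.length
    · exact hA4 j hj hjn
    · exact pv_getD_ge _ j "A" (by rw [l3]; omega)
  have hcast : ((supply.length : Int) - 1) = ((supply.length - 1 : Nat) : Int) := by omega
  have hb := backLoop_eq (stB supply a_rate b_cost supply.length).2.2 supply.length
      (supply.length - 1) [] (by omega) h4
  rw [ALG_eq_stA, ALG_alt_eq_stB, l2, hsch (supply.length - 1) (by omega), hcast, hb]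
  simp
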